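-- pv_equiv track=rewrite | github.com/thanford7/jobVyne | backend/jvapp/utils/security.py | get_reversible_hash
-- ===== SOURCE A (Python) =====
-- HASH_SALT = 'adsklgnsalg239rsfdknasl!($KWLERQ@'
--
-- HASH_SHIFT = 6
--
-- def get_reversible_hash(text):
--     salted_text = ''
--     for idx, char in enumerate(text):
--         salted_text += char
--         if idx and (not idx % 3):
--             count = int((idx / 3) % len(HASH_SALT))
--             salted_text += HASH_SALT[count]
--     hashed_text = ''
--     for char in salted_text:
--         hashed_text += chr(ord(char) + HASH_SHIFT)
--
--     return hashed_text
-- ===== SOURCE B (Python) =====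
-- HASH_SALT = 'adsklgnsalg239rsfdknasl!($KWLERQ@'
--
-- HASH_SHIFT = 6
--
-- def get_reversible_hash(text):
--     # Single pass: shift each character as it is consumed and interleave the
--     # (shifted) salt characters directly, collecting into a list joined once.
--     out = []
--     for idx, char in enumerate(text):
--         out.append(chr(ord(char) + HASH_SHIFT))
--         if idx and idx % 3 == 0:
--             out.append(chr(ord(HASH_SALT[(idx // 3) % len(HASH_SALT)]) + HASH_SHIFT))
--     return ''.join(out)
-- ===== Notes on version B (the rewrite author's own statement) =====
-- stated objective: faster
-- what changed: Fuses A's two sequential passes (build salted string, then Caesar-shift it) into one pass over enumerate(text) that emits already-shifted characters into a list joined once, removing the intermediate string and the quadratic += string concatenation.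
import Mathlib
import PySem

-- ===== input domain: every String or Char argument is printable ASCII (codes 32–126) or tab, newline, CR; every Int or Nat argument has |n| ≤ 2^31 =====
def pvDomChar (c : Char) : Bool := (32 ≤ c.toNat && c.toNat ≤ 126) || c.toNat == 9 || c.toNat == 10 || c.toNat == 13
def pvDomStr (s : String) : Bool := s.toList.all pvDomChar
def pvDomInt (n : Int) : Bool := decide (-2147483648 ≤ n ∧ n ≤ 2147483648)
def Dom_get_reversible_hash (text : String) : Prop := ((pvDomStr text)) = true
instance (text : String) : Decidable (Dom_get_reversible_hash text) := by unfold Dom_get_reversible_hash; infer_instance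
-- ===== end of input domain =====

-- B fuses A's two passes (salt insertion, then Caesar shift) into one pass that emits
-- already-shifted characters; equivalence of return values is proved for all strings.

def pvSalt : List Char := "adsklgnsalg239rsfdknasl!($KWLERQ@".toList

-- ===== PORT A =====
def get_reversible_hash (text : String) : String :=
  let salted := (PySem.List.enumerate text.toList).foldl
    (fun acc (p : Int × Char) =>
      let acc := acc ++ [p.2]
      if p.1 ≠ 0 ∧ PySem.Int.mod p.1 3 = 0 then
        -- int((idx / 3) % len(HASH_SALT)): Python float division; exact as floor
        -- division here since idx % 3 == 0 and idx fits a double exactly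
        let count := PySem.Int.mod (PySem.Int.floordiv p.1 3) 33
        acc ++ [(PySem.List.pyGet? pvSalt count).getD ' ']
      else acc) []
  String.mk (salted.foldl (fun acc c => acc ++ [Char.ofNat (c.toNat + 6)]) [])

-- ===== PORT B =====
def get_reversible_hash_alt (text : String) : String :=
  String.mk ((PySem.List.enumerate text.toList).foldl
    (fun acc (p : Int × Char) =>
      let acc := acc ++ [Char.ofNat (p.2.toNat + 6)]
      if p.1 ≠ 0 ∧ PySem.Int.mod p.1 3 = 0 then
        acc ++ [Char.ofNat (((PySem.List.pyGet? pvSalt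
            (PySem.Int.mod (PySem.Int.floordiv p.1 3) 33)).getD ' ').toNat + 6)]
      else acc) [])

-- ===== PRECONDITION & SPEC =====
def Spec_get_reversible_hash (text : String) (out : String) : Prop := out = get_reversible_hash_alt text
instance (text : String) (out : String) : Decidable (Spec_get_reversible_hash text out) := by unfold Spec_get_reversible_hash; infer_instance

-- ===== CLAIM (what is proved, stated in full; the proofs are below) =====
def Claim_equal_get_reversible_hash : Prop := ∀ (text : String), Dom_get_reversible_hash text → Spec_get_reversible_hash text (get_reversible_hash text)

-- ===== LEMMAS AND PROOFS =====

-- abbreviations for the two loop bodies (proof-only)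
def pvShift (c : Char) : Char := Char.ofNat (c.toNat + 6)

def pvStepA (acc : List Char) (p : Int × Char) : List Char :=
  let acc := acc ++ [p.2]
  if p.1 ≠ 0 ∧ PySem.Int.mod p.1 3 = 0 then
    acc ++ [(PySem.List.pyGet? pvSalt (PySem.Int.mod (PySem.Int.floordiv p.1 3) 33)).getD ' ']
  else acc

def pvStepB (acc : List Char) (p : Int × Char) : List Char :=
  let acc := acc ++ [pvShift p.2]
  if p.1 ≠ 0 ∧ PySem.Int.mod p.1 3 = 0 then
    acc ++ [pvShift ((PySem.List.pyGet? pvSalt (PySem.Int.mod (PySem.Int.floordiv p.1 3) 33)).getD ' ')]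
  else acc

-- mapping the shift over A's accumulated salted prefix gives B's accumulated prefix
theorem pv_map_fold (l : List (Int × Char)) :
    ∀ acc : List Char, (l.foldl pvStepA acc).map pvShift = l.foldl pvStepB (acc.map pvShift) := by
  induction l with
  | nil => intro acc; rfl
  | cons p l ih =>
    intro acc
    simp only [List.foldl_cons, ih]
    congr 1
    simp only [pvStepA, pvStepB]
    split_ifs with h <;> simp [List.map_append]

-- ===== VERDICT (by name: the statement is the Claim_ definition above) =====
theorem get_reversible_hash_spec : Claim_equal_get_reversible_hash := by
  intro text _
  show _ = _
  unfold get_reversible_hash get_reversible_hash_alt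
  have h1 : ∀ (l : List Char) (acc : List Char),
      l.foldl (fun acc c => acc ++ [Char.ofNat (c.toNat + 6)]) acc = acc ++ l.map pvShift :=
    fun l acc => PySem.List.foldl_append_singleton_eq_map pvShift l acc
  simp only [h1, List.nil_append]
  have := pv_map_fold (PySem.List.enumerate text.toList) []
  simp only [List.map_nil] at this
  rw [show (fun (acc : List Char) (p : Int × Char) =>
        let acc := acc ++ [p.2];
        if p.1 ≠ 0 ∧ PySem.Int.mod p.1 3 = 0 then
          let count := PySem.Int.mod (PySem.Int.floordiv p.1 3) 33
          acc ++ [(PySem.List.pyGet? pvSalt count).getD ' ']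
        else acc) = pvStepA from rfl]
  rw [this]
  rfl
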